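-- pv_equiv track=rewrite | github.com/jraynolds/Glimmer-and-Gloom | bot.py | get_nw
-- ===== SOURCE A (Python) =====
-- def get_nw(pts):
-- 	nw = pts[0]
-- 	for pt in pts:
-- 		if pt[1] < nw[1]:
-- 			nw = pt
-- 		elif pt[1] == nw[1] and pt[0] < nw[0]:
-- 			nw = pt
-- 	return nw
-- ===== SOURCE B (Python) =====
-- def get_nw(pts):
-- 	return sorted(pts, key=lambda p: (p[1], p[0]))[0]
-- ===== Notes on version B (the rewrite author's own statement) =====
-- stated objective: idiomatic
-- what changed: Replaces the explicit min-tracking loop with a stable sort by the (y, x) key and picking the first element.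
import Mathlib
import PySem

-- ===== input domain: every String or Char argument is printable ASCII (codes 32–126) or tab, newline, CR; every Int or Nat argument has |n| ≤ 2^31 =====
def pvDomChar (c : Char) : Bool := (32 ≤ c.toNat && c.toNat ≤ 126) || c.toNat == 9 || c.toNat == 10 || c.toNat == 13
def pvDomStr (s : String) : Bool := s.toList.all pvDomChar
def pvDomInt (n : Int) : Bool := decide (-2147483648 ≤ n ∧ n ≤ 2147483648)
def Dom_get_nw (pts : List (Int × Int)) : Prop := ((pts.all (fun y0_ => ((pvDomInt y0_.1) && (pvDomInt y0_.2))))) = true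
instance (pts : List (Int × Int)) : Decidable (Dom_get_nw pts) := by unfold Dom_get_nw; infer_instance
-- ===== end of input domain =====

-- B replaces A's explicit min-tracking loop with a stable sort by the (y, x) key and
-- taking the first element (idiomatic; return value only, no mutation in either version).

-- ===== PORT A =====
-- nw = pts[0]; for pt in pts: update nw on strict (y, then x) improvement; return nw
def get_nw (pts : List (Int × Int)) : Int × Int :=
  match PySem.List.pyGet? pts 0 with
  | none => (0, 0)   -- pts[0] raises IndexError on []; excluded by Pre_get_nw
  | some nw0 =>
      pts.foldl (fun nw pt =>
        if pt.2 < nw.2 then pt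
        else if pt.2 = nw.2 ∧ pt.1 < nw.1 then pt
        else nw) nw0

-- ===== PORT B =====
-- return sorted(pts, key=lambda p: (p[1], p[0]))[0]
def get_nw_alt (pts : List (Int × Int)) : Int × Int :=
  match PySem.List.sorted2 pts (fun p => p.2) (fun p => p.1) with
  | [] => (0, 0)   -- sorted([])[0] raises IndexError; excluded by Pre_get_nw
  | m :: _ => m

-- ===== PRECONDITION & SPEC =====
-- Both Pythons raise IndexError on the empty list; only that input is excluded.
def Pre_get_nw (pts : List (Int × Int)) : Prop := pts ≠ []
instance (pts : List (Int × Int)) : Decidable (Pre_get_nw pts) := by unfold Pre_get_nw; infer_instance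
def pvWitness_get_nw : (List (Int × Int)) := [(2, 1), (0, 1), (5, -3)]

def Spec_get_nw (pts : List (Int × Int)) (out : Int × Int) : Prop := out = get_nw_alt pts
instance (pts : List (Int × Int)) (out : Int × Int) : Decidable (Spec_get_nw pts out) := by unfold Spec_get_nw; infer_instance

-- ===== CLAIM (what is proved, stated in full; the proofs are below) =====
def Claim_equal_get_nw : Prop := ∀ (pts : List (Int × Int)), Dom_get_nw pts → Pre_get_nw pts → Spec_get_nw pts (get_nw pts)

-- ===== LEMMAS AND PROOFS =====

-- the strict "(y, x) lexicographically before" test used by sorted2's insertion sort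
def pvBefore (a b : Int × Int) : Bool :=
  decide (a.2 < b.2) || (!decide (b.2 < a.2) && decide (a.1 < b.1))

-- A's branch chain is exactly "replace nw by pt iff pvBefore pt nw"
theorem pv_step_eq (nw pt : Int × Int) :
    (if pt.2 < nw.2 then pt else if pt.2 = nw.2 ∧ pt.1 < nw.1 then pt else nw)
      = (if pvBefore pt nw then pt else nw) := by
  simp only [pvBefore]
  split_ifs with h1 h2 h3 h3 <;> simp_all <;> omega

-- inserting x in front-sorted position: the new head is the smaller of x and the old head
theorem pv_insertBy_head (before : Int × Int → Int × Int → Bool) (x h : Int × Int)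
    (t : List (Int × Int)) :
    ∃ t', PySem.List.insertBy before x (h :: t) = (if before x h then x else h) :: t' := by
  by_cases hb : before x h
  · exact ⟨h :: t, by simp [PySem.List.insertBy, hb]⟩
  · exact ⟨PySem.List.insertBy before x t, by simp [PySem.List.insertBy, hb]⟩

-- head of the insertion-sort fold = the min-tracking fold
theorem pv_foldl_ins_head (before : Int × Int → Int × Int → Bool) :
    ∀ (xs : List (Int × Int)) (h : Int × Int) (t : List (Int × Int)),
    ∃ t', xs.foldl (fun acc x => PySem.List.insertBy before x acc) (h :: t)
        = (xs.foldl (fun nw pt => if before pt nw then pt else nw) h) :: t' := by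
  intro xs
  induction xs with
  | nil => exact fun h t => ⟨t, rfl⟩
  | cons x xs ih =>
      intro h t
      obtain ⟨t'', ht⟩ := pv_insertBy_head before x h t
      simpa [List.foldl_cons, ht] using ih (if before x h then x else h) t''

-- ===== VERDICT (by name: the statement is the Claim_ definition above) =====
theorem get_nw_spec : Claim_equal_get_nw := by
  intro pts _ hpre
  unfold Spec_get_nw
  match pts, hpre with
  | x :: xs, _ =>
    have hstep : (fun nw pt : Int × Int =>
        if pt.2 < nw.2 then pt else if pt.2 = nw.2 ∧ pt.1 < nw.1 then pt else nw)
        = (fun nw pt => if pvBefore pt nw then pt else nw) := by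
      funext nw pt; exact pv_step_eq nw pt
    have hself : pvBefore x x = false := by simp [pvBefore]
    have hA : get_nw (x :: xs)
        = xs.foldl (fun nw pt => if pvBefore pt nw then pt else nw) x := by
      simp [get_nw, PySem.List.pyGet?, PySem.List.pyIdx?, hstep, List.foldl_cons, hself]
    obtain ⟨t', ht⟩ := pv_foldl_ins_head pvBefore xs x []
    have hB : get_nw_alt (x :: xs)
        = xs.foldl (fun nw pt => if pvBefore pt nw then pt else nw) x := by
      have hs : PySem.List.sorted2 (x :: xs) (fun p => p.2) (fun p => p.1)
          = (xs.foldl (fun nw pt => if pvBefore pt nw then pt else nw) x) :: t' := by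
        simpa [PySem.List.sorted2, pvBefore, List.foldl_cons, PySem.List.insertBy] using ht
      simp [get_nw_alt, hs]
    rw [hA, hB]
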